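-- pv_equiv track=rewrite | github.com/exasol/script-languages-container-tool | exasol/slc/internal/tasks/test/test_runner_db_test_task.py | get_result_status
-- ===== SOURCE A (Python) =====
-- def get_result_status(status):
--     result_status = "OK"
--     for line in status.split("\n"):
--         if line != "":
--             if line.endswith("FAILED"):
--                 result_status = "FAILED"
--                 break
--     return result_status
-- ===== SOURCE B (Python) =====
-- def get_result_status(status):
--     return "FAILED" if "FAILED\n" in status or status.endswith("FAILED") else "OK"
-- ===== Notes on version B (the rewrite author's own statement) =====
-- stated objective: simpler
-- what changed: Replaces the split-into-lines loop with a single substring test: some line ends with FAILED iff 'FAILED\n' occurs in the string or the string itself ends with 'FAILED'.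
import Mathlib
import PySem

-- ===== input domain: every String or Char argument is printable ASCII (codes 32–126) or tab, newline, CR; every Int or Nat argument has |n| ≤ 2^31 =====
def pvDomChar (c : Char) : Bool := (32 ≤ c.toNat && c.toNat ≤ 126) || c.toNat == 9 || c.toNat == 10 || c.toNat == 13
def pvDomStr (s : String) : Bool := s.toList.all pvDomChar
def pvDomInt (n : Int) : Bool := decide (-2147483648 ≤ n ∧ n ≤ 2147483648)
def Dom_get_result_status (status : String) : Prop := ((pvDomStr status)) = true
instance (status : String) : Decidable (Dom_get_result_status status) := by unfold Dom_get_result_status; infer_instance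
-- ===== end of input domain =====

-- B replaces A's split-into-lines loop by a single substring test ("FAILED\n" in status
-- or status.endswith("FAILED")): simpler, no explicit iteration over lines.

-- ===== PORT A =====
-- the for-line loop with its break, as structural recursion over the split result
def getRsLoop : List String → String
  | [] => "OK"
  | line :: rest =>
    if line ≠ "" then
      if PySem.Str.endswith line "FAILED" then "FAILED" else getRsLoop rest
    else getRsLoop rest

def get_result_status (status : String) : String :=
  match PySem.Str.split? status "\n" with
  | some lines => getRsLoop lines
  | none => "OK"   -- unreachable: the separator "\n" is nonempty, so split? never raises

-- ===== PORT B =====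
def get_result_status_alt (status : String) : String :=
  if PySem.Str.isIn "FAILED\n" status || PySem.Str.endswith status "FAILED" then "FAILED" else "OK"

-- ===== PRECONDITION & SPEC =====
def Spec_get_result_status (status : String) (out : String) : Prop := out = get_result_status_alt status
instance (status : String) (out : String) : Decidable (Spec_get_result_status status out) := by unfold Spec_get_result_status; infer_instance

-- ===== CLAIM (what is proved, stated in full; the proofs are below) =====
def Claim_equal_get_result_status : Prop := ∀ (status : String), Dom_get_result_status status → Spec_get_result_status status (get_result_status status)

-- ===== LEMMAS AND PROOFS =====

-- the characters of "FAILED", as a plain list literal (kept folded by simp)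
def FL : List Char := ['F', 'A', 'I', 'L', 'E', 'D']

-- a plain structural version of splitOn on the single-character separator '\n'
def sop : List Char → List Char → List (List Char)
  | [], cur => [cur.reverse]
  | c :: rest, cur => if c = '\n' then cur.reverse :: sop rest [] else sop rest (c :: cur)

lemma go_eq (fuel : Nat) (l cur : List Char) (acc : List (List Char)) (h : l.length ≤ fuel) :
    PySem.Chars.splitOn.go ['\n'] fuel l cur acc = acc.reverse ++ sop l cur := by
  induction fuel generalizing l cur acc with
  | zero =>
    have hl : l = [] := by cases l <;> simp_all
    subst hl
    rw [PySem.Chars.splitOn.go.eq_def]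
    simp [sop]
  | succ n ih =>
    cases l with
    | nil => rw [PySem.Chars.splitOn.go.eq_def]; simp [sop]
    | cons c rest =>
      rw [PySem.Chars.splitOn.go.eq_def]
      simp only [List.isPrefixOf, Bool.and_true, List.length_cons, List.length_nil,
        List.drop_succ_cons, List.drop_zero]
      have hle : rest.length ≤ n := by simp at h; omega
      by_cases hc : c = '\n'
      · subst hc
        rw [if_pos (by simp)]
        rw [ih rest [] (cur.reverse :: acc) hle]
        simp [sop]
      · rw [if_neg (by simp [Ne.symm hc])]
        rw [ih rest (c :: cur) acc hle]
        simp [sop, hc]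

lemma splitOn_eq (s : List Char) : PySem.Chars.splitOn s ['\n'] = sop s [] := by
  unfold PySem.Chars.splitOn
  rw [go_eq (s.length + 1) s [] [] (by omega)]
  simp

lemma endswith_eq_decide (l : List Char) :
    PySem.Chars.endswith l FL = decide (FL <:+ l) := by
  by_cases hs : FL <:+ l
  · simp [hs, (PySem.Chars.endswith_iff l FL).2 hs]
  · cases hx : PySem.Chars.endswith l FL with
    | false => simp [hs]
    | true => exact absurd ((PySem.Chars.endswith_iff _ _).1 hx) hs

lemma isIn_eq_decide (l : List Char) :
    PySem.Chars.isIn (FL ++ ['\n']) l = decide (FL ++ ['\n'] <:+: l) := by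
  by_cases hs : FL ++ ['\n'] <:+: l
  · simp [hs, (PySem.Chars.isIn_iff_infix _ _).2 hs]
  · simp [hs, (PySem.Chars.isIn_eq_false_iff _ _).2 hs]

lemma getRsLoop_cons' (l : List Char) (rest : List String) :
    getRsLoop (String.ofList l :: rest) =
      if PySem.Chars.endswith l FL then "FAILED" else getRsLoop rest := by
  have hFt : "FAILED".toList = FL := rfl
  by_cases h : l = []
  · subst h
    have he : PySem.Chars.endswith [] FL = false := by decide
    simp [getRsLoop, he]
  · have hne : String.ofList l ≠ "" := by simp [h]
    simp only [getRsLoop, ne_eq, hne, not_false_eq_true, if_true,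
      PySem.Str.endswith_eq, String.toList_ofList, hFt]

lemma pref_break {p u v : List Char} (hp : '\n' ∉ p) : p <+: u ++ '\n' :: v ↔ p <+: u := by
  induction p generalizing u with
  | nil => simp
  | cons x p' ih =>
    have hx : x ≠ '\n' := fun h => hp (h ▸ List.mem_cons_self)
    have hp' : '\n' ∉ p' := fun h => hp (List.mem_cons_of_mem _ h)
    cases u with
    | nil =>
      simp only [List.nil_append, List.cons_prefix_cons]
      constructor
      · rintro ⟨h1, _⟩; exact absurd h1 hx
      · intro h; exact absurd h (by simp)
    | cons c u' =>
      simp only [List.cons_append, List.cons_prefix_cons]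
      rw [ih hp']

lemma suf_break {p u v : List Char} (hp : '\n' ∉ p) : p <:+ u ++ '\n' :: v ↔ p <:+ v := by
  have h1 : p <:+ u ++ '\n' :: v ↔ p.reverse <+: (u ++ '\n' :: v).reverse :=
    (List.reverse_prefix).symm
  have h2 : (u ++ '\n' :: v).reverse = v.reverse ++ '\n' :: u.reverse := by simp
  rw [h1, h2, pref_break (by simpa using hp), List.reverse_prefix]

lemma prefq {p u v : List Char} (hp : '\n' ∉ p) (hu : '\n' ∉ u) :
    p ++ ['\n'] <+: u ++ '\n' :: v ↔ u = p := by
  induction p generalizing u with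
  | nil =>
    cases u with
    | nil => simp
    | cons c u' =>
      have hc : c ≠ '\n' := fun h => hu (h ▸ List.mem_cons_self)
      simp only [List.nil_append, List.cons_append, List.cons_prefix_cons]
      constructor
      · rintro ⟨h1, _⟩; exact absurd h1.symm hc
      · intro h; simp at h
  | cons x p' ih =>
    have hx : x ≠ '\n' := fun h => hp (h ▸ List.mem_cons_self)
    have hp' : '\n' ∉ p' := fun h => hp (List.mem_cons_of_mem _ h)
    cases u with
    | nil =>
      simp only [List.nil_append, List.cons_append, List.cons_prefix_cons]
      constructor
      · rintro ⟨h1, _⟩; exact absurd h1 hx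
      · intro h; simp at h
    | cons c u' =>
      have hu' : '\n' ∉ u' := fun h => hu (List.mem_cons_of_mem _ h)
      simp only [List.cons_append, List.cons_prefix_cons]
      rw [ih hp' hu']
      constructor
      · rintro ⟨rfl, rfl⟩; rfl
      · intro h; injection h with h1 h2; exact ⟨h1.symm, h2⟩

lemma infq {u v : List Char} (hu : '\n' ∉ u) :
    FL ++ ['\n'] <:+: u ++ '\n' :: v ↔ FL <:+ u ∨ FL ++ ['\n'] <:+: v := by
  have hF : '\n' ∉ FL := by decide
  induction u with
  | nil =>
    rw [List.nil_append, List.infix_cons_iff]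
    constructor
    · rintro (h | h)
      · exfalso
        rw [show FL ++ ['\n'] = 'F' :: ('A' :: 'I' :: 'L' :: 'E' :: 'D' :: ['\n']) from rfl,
          List.cons_prefix_cons] at h
        exact absurd h.1 (by decide)
      · exact Or.inr h
    · rintro (h | h)
      · exact absurd h (by simp [FL])
      · exact Or.inr h
  | cons c u' ih =>
    have hu' : '\n' ∉ u' := fun h => hu (List.mem_cons_of_mem _ h)
    have e1 := ih hu'
    rw [List.cons_append, List.infix_cons_iff]
    simp only [e1]
    rw [List.suffix_cons_iff]
    have e2 : FL ++ ['\n'] <+: c :: (u' ++ '\n' :: v) ↔ c :: u' = FL := prefq hF hu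
    rw [e2]
    tauto

lemma main_loop (s cur : List Char) (h : '\n' ∉ cur) :
    getRsLoop ((sop s cur).map String.ofList) =
      if FL ++ ['\n'] <:+: cur.reverse ++ s ∨ FL <:+ cur.reverse ++ s
      then "FAILED" else "OK" := by
  have hF : '\n' ∉ FL := by decide
  induction s generalizing cur with
  | nil =>
    have hrev : '\n' ∉ cur.reverse := by simpa using h
    simp only [sop, List.map, List.append_nil]
    rw [getRsLoop_cons', endswith_eq_decide]
    have hnotin : ¬ (FL ++ ['\n'] <:+: cur.reverse) := fun hi =>
      hrev (hi.subset (by simp))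
    by_cases hs : FL <:+ cur.reverse
    · simp [hs]
    · simp [hs, hnotin, getRsLoop]
  | cons c rest ih =>
    have hrev : '\n' ∉ cur.reverse := by simpa using h
    by_cases hc : c = '\n'
    · subst hc
      simp only [sop, if_true, List.map_cons]
      rw [getRsLoop_cons', endswith_eq_decide]
      have hiff1 := infq (u := cur.reverse) (v := rest) hrev
      have hiff2 := suf_break (p := FL) (u := cur.reverse) (v := rest) hF
      by_cases hs : FL <:+ cur.reverse
      · simp only [hs, decide_true, if_true]
        rw [if_pos (Or.inl (hiff1.2 (Or.inl hs)))]
      · simp only [hs, decide_false, Bool.false_eq_true, if_false]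
        rw [ih [] (by simp)]
        simp only [List.reverse_nil, List.nil_append]
        by_cases h1 : FL ++ ['\n'] <:+: rest
        · rw [if_pos (Or.inl h1), if_pos (Or.inl (hiff1.2 (Or.inr h1)))]
        · by_cases h2 : FL <:+ rest
          · rw [if_pos (Or.inr h2), if_pos (Or.inr (hiff2.2 h2))]
          · rw [if_neg (by rintro (hh | hh); exacts [h1 hh, h2 hh])]
            rw [if_neg (by
              rintro (hh | hh)
              · rcases hiff1.1 hh with h' | h'
                · exact hs h'
                · exact h1 h'
              · exact h2 (hiff2.1 hh))]
    · simp only [sop, if_neg hc]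
      rw [ih (c :: cur) (by
        intro hm
        rcases List.mem_cons.1 hm with hm | hm
        · exact hc hm.symm
        · exact h hm)]
      simp [List.reverse_cons, List.append_assoc]

-- ===== VERDICT (by name: the statement is the Claim_ definition above) =====
theorem get_result_status_spec : Claim_equal_get_result_status := by
  intro status _
  unfold Spec_get_result_status get_result_status get_result_status_alt
  have hsplit : PySem.Str.split? status "\n" =
      some ((sop status.toList []).map String.ofList) := by
    rw [PySem.Str.split?, show "\n".toList = ['\n'] from rfl, PySem.Chars.split?]
    simp [splitOn_eq]
  rw [hsplit]
  show getRsLoop ((sop status.toList []).map String.ofList) = _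
  rw [main_loop status.toList [] (by simp)]
  simp only [List.reverse_nil, List.nil_append]
  have hin : PySem.Str.isIn "FAILED\n" status =
      decide (FL ++ ['\n'] <:+: status.toList) := by
    rw [PySem.Str.isIn_eq, show "FAILED\n".toList = FL ++ ['\n'] from rfl]
    exact isIn_eq_decide _
  have hend : PySem.Str.endswith status "FAILED" = decide (FL <:+ status.toList) := by
    rw [PySem.Str.endswith_eq, show "FAILED".toList = FL from rfl]
    exact endswith_eq_decide _
  rw [hin, hend]
  by_cases h1 : FL ++ ['\n'] <:+: status.toList <;>
    by_cases h2 : FL <:+ status.toList <;>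
      simp [h1, h2]
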